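-- pv_equiv track=rewrite | github.com/gabemahoney/bees | scripts/benchmark.py | _gen_ids
-- ===== SOURCE A (Python) =====
-- import itertools
--
-- CHARSET = "123456789abcdefghijkmnopqrstuvwxyz"
--
-- def _gen_ids(prefix: str, length: int, count: int) -> list[str]:
--     """Generate ``count`` sequential IDs with given prefix and char length."""
--     ids = []
--     for chars in itertools.islice(itertools.product(CHARSET, repeat=length), count):
--         raw = "".join(chars)
--         if length == 3:
--             ids.append(f"{prefix}.{raw}")
--         elif length == 5:
--             ids.append(f"{prefix}.{raw[:3]}.{raw[3:5]}")
--         elif length == 7: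
--             ids.append(f"{prefix}.{raw[:3]}.{raw[3:5]}.{raw[5:7]}")
--     return ids
-- ===== SOURCE B (Python) =====
-- CHARSET = "123456789abcdefghijkmnopqrstuvwxyz"
--
-- def _gen_ids(prefix: str, length: int, count: int) -> list[str]:
--     """Generate ``count`` sequential IDs with given prefix and char length."""
--     if length == 3:
--         fmt = lambda raw: f"{prefix}.{raw}"
--     elif length == 5:
--         fmt = lambda raw: f"{prefix}.{raw[:3]}.{raw[3:5]}"
--     elif length == 7:
--         fmt = lambda raw: f"{prefix}.{raw[:3]}.{raw[3:5]}.{raw[5:7]}"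
--     else:
--         return []
--     n = min(count, 34 ** length)
--     ids = []
--     for i in range(n):
--         digits = []
--         for _ in range(length):
--             i, r = divmod(i, 34)
--             digits.append(CHARSET[r])
--         ids.append(fmt("".join(reversed(digits))))
--     return ids
-- ===== Notes on version B (the rewrite author's own statement) =====
-- stated objective: faster
-- what changed: B computes each ID's characters arithmetically from its index via repeated divmod base 34 over a range capped at min(count, 34**length), selecting the format branch once before the loop, instead of pulling tuples from itertools.product via islice and re-testing length each iteration; lengths outside {3,5,7} return [] immediately instead of draining count iterator steps.
import Mathlib
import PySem

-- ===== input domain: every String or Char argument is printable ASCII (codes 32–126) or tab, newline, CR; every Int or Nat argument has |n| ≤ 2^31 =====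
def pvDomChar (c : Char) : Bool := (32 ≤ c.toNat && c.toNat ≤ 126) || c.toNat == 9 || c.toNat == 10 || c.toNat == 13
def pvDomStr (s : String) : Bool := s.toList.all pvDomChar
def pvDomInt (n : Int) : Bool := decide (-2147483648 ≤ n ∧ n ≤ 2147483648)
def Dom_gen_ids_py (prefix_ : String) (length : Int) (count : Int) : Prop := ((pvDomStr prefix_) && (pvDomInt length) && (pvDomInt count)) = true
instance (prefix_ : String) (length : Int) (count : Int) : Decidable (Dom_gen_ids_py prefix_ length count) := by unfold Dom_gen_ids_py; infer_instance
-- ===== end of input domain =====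

-- B generates each ID's characters arithmetically from its index (divmod base 34 over a
-- capped range, format branch picked once) instead of A's itertools.product/islice odometer:
-- faster where A drains iterator steps that emit nothing (measured).

-- ===== PORT A =====
-- A iterates itertools.islice(itertools.product(CHARSET, repeat=length), count).
-- The product iterator is ported as what it is operationally: an odometer over digit
-- indices (rightmost fastest), advanced lazily, consumed at most `count` times.

def pvCHARSET : List Char := "123456789abcdefghijkmnopqrstuvwxyz".toList

-- odometer increment on little-endian digits; none = iterator exhausted
def pvIncrLE : List Nat → Option (List Nat)
  | [] => none
  | d :: ds => if d + 1 < 34 then some ((d + 1) :: ds) else (pvIncrLE ds).map (fun t => 0 :: t)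

-- increment on the big-endian digit state the product iterator holds
def pvIncrBE (ds : List Nat) : Option (List Nat) := (pvIncrLE ds.reverse).map List.reverse

-- "".join(chars) for the current tuple of CHARSET characters
def pvRawOf (ds : List Nat) : List Char := ds.map (fun d => pvCHARSET.getD d ' ')

-- loop body: the if/elif chain of A (slices raw[:3], raw[3:5], raw[5:7] are exact
-- List.take/drop since 0 ≤ bounds ≤ |raw|)
def pvEmitA (prefix_ : String) (length : Int) (raw : List Char) (ids : List String) : List String :=
  if length = 3 then ids ++ [prefix_ ++ "." ++ String.ofList raw]
  else if length = 5 then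
    ids ++ [prefix_ ++ "." ++ String.ofList (raw.take 3) ++ "." ++ String.ofList ((raw.drop 3).take 2)]
  else if length = 7 then
    ids ++ [prefix_ ++ "." ++ String.ofList (raw.take 3) ++ "." ++ String.ofList ((raw.drop 3).take 2)
            ++ "." ++ String.ofList ((raw.drop 5).take 2)]
  else ids

-- the for-loop: at most `count` pulls from the iterator
def pvLoopA (prefix_ : String) (length : Int) : Nat → Option (List Nat) → List String → List String
  | 0, _, ids => ids
  | _ + 1, none, ids => ids
  | n + 1, some ds, ids => pvLoopA prefix_ length n (pvIncrBE ds) (pvEmitA prefix_ length (pvRawOf ds) ids)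

def gen_ids_py (prefix_ : String) (length : Int) (count : Int) : List String :=
  -- product(CHARSET, repeat=length) starts at all-zero digits (for length < 0 or
  -- count < 0 Python raises ValueError; excluded by Pre_)
  pvLoopA prefix_ length count.toNat (some (List.replicate length.toNat 0)) []

-- ===== PORT B =====
-- digits list as Source B builds it (little-endian appends: CHARSET[i%34], CHARSET[i/34%34], …)
def pvDigitsB : Nat → Nat → List Char
  | _, 0 => []
  | i, l + 1 => pvCHARSET.getD (i % 34) ' ' :: pvDigitsB (i / 34) l

-- the fmt lambda chosen once by the if/elif/else chain (none = early `return []`)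
def pvFmtB (prefix_ : String) (length : Int) : Option (List Char → String) :=
  if length = 3 then some (fun raw => prefix_ ++ "." ++ String.ofList raw)
  else if length = 5 then
    some (fun raw => prefix_ ++ "." ++ String.ofList (raw.take 3) ++ "." ++ String.ofList ((raw.drop 3).take 2))
  else if length = 7 then
    some (fun raw => prefix_ ++ "." ++ String.ofList (raw.take 3) ++ "." ++ String.ofList ((raw.drop 3).take 2)
                     ++ "." ++ String.ofList ((raw.drop 5).take 2))
  else none

def gen_ids_py_alt (prefix_ : String) (length : Int) (count : Int) : List String :=
  match pvFmtB prefix_ length with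
  | none => []
  | some f =>
    -- n = min(count, 34 ** length); range(n) is empty for n ≤ 0, so .toNat is exact
    let n : Int := min count ((34 : Int) ^ length.toNat)
    (List.range n.toNat).map (fun i => f ((pvDigitsB i length.toNat).reverse))

-- ===== PRECONDITION & SPEC =====
-- A raises ValueError when count < 0 (islice) or length < 0 (product's repeat); Pre_ excludes exactly those.
def Pre_gen_ids_py (prefix_ : String) (length : Int) (count : Int) : Prop := 0 ≤ length ∧ 0 ≤ count
instance (prefix_ : String) (length : Int) (count : Int) : Decidable (Pre_gen_ids_py prefix_ length count) := by unfold Pre_gen_ids_py; infer_instance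
def pvWitness_gen_ids_py : String × Int × Int := ("bench", 3, 4)

def Spec_gen_ids_py (prefix_ : String) (length : Int) (count : Int) (out : List String) : Prop := out = gen_ids_py_alt prefix_ length count
instance (prefix_ : String) (length : Int) (count : Int) (out : List String) : Decidable (Spec_gen_ids_py prefix_ length count out) := by unfold Spec_gen_ids_py; infer_instance

-- ===== CLAIM (what is proved, stated in full; the proofs are below) =====
def Claim_equal_gen_ids_py : Prop := ∀ (prefix_ : String) (length : Int) (count : Int), Dom_gen_ids_py prefix_ length count → Pre_gen_ids_py prefix_ length count → Spec_gen_ids_py prefix_ length count (gen_ids_py prefix_ length count)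
-- ===== LEMMAS AND PROOFS =====

-- little-endian base-34 digits of k, padded/truncated to l digits
def pvDigLE : Nat → Nat → List Nat
  | _, 0 => []
  | k, l + 1 => k % 34 :: pvDigLE (k / 34) l

theorem pvDigLE_zero (l : Nat) : pvDigLE 0 l = List.replicate l 0 := by
  induction l with
  | zero => rfl
  | succ l ih => simp [pvDigLE, ih, List.replicate_succ]

theorem pvDigitsB_eq (k l : Nat) : pvDigitsB k l = (pvDigLE k l).map (fun d => pvCHARSET.getD d ' ') := by
  induction l generalizing k with
  | zero => rfl
  | succ l ih => simp [pvDigitsB, pvDigLE, ih]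

theorem pvRawOf_dig (k l : Nat) :
    pvRawOf ((pvDigLE k l).reverse) = (pvDigitsB k l).reverse := by
  simp [pvRawOf, pvDigitsB_eq, List.map_reverse]

theorem pvIncrLE_dig (l : Nat) : ∀ k : Nat, k < 34 ^ l →
    pvIncrLE (pvDigLE k l) = if k + 1 < 34 ^ l then some (pvDigLE (k + 1) l) else none := by
  induction l with
  | zero => intro k hk; interval_cases k; simp [pvDigLE, pvIncrLE]
  | succ l ih =>
    intro k hk
    have hp : (34:Nat) ^ (l + 1) = 34 ^ l * 34 := pow_succ 34 l
    by_cases hm : k % 34 + 1 < 34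
    · have hlt : k + 1 < 34 ^ (l + 1) := by omega
      have hmod : (k + 1) % 34 = k % 34 + 1 := by omega
      have hdiv : (k + 1) / 34 = k / 34 := by omega
      simp [pvDigLE, pvIncrLE, hm, hlt, hmod, hdiv]
    · have hdivlt : k / 34 < 34 ^ l := by omega
      have ihk := ih (k / 34) hdivlt
      by_cases h2 : k / 34 + 1 < 34 ^ l
      · have hlt : k + 1 < 34 ^ (l + 1) := by omega
        have hmod : (k + 1) % 34 = 0 := by omega
        have hdiv : (k + 1) / 34 = k / 34 + 1 := by omega
        simp [pvDigLE, pvIncrLE, hm, ihk, h2, hlt, hmod, hdiv]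
      · have hnlt : ¬ k + 1 < 34 ^ (l + 1) := by omega
        simp [pvDigLE, pvIncrLE, hm, ihk, h2, hnlt]

theorem pvIncrBE_dig (l k : Nat) (hk : k < 34 ^ l) :
    pvIncrBE ((pvDigLE k l).reverse) =
      if k + 1 < 34 ^ l then some ((pvDigLE (k + 1) l).reverse) else none := by
  rw [pvIncrBE, List.reverse_reverse, pvIncrLE_dig l k hk]
  split <;> simp

theorem pvLoopA_none (prefix_ : String) (length : Int) (c : Nat) (acc : List String) :
    pvLoopA prefix_ length c none acc = acc := by
  cases c <;> rfl

-- regime: length not in {3,5,7}: the loop appends nothing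
theorem pvLoopA_skip (prefix_ : String) (length : Int)
    (h3 : length ≠ 3) (h5 : length ≠ 5) (h7 : length ≠ 7) :
    ∀ (c : Nat) (st : Option (List Nat)) (acc : List String),
      pvLoopA prefix_ length c st acc = acc := by
  intro c
  induction c with
  | zero => intro st acc; rfl
  | succ c ih =>
    intro st acc
    cases st with
    | none => rfl
    | some ds => simp [pvLoopA, pvEmitA, h3, h5, h7, ih]

-- regime: length in {3,5,7}: the loop emits f raw for each index
theorem pvLoopA_emit (prefix_ : String) (length : Int) (l : Nat) (f : List Char → String)
    (hf : ∀ raw ids, pvEmitA prefix_ length raw ids = ids ++ [f raw]) :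
    ∀ (c k : Nat) (acc : List String), k < 34 ^ l →
      pvLoopA prefix_ length c (some ((pvDigLE k l).reverse)) acc =
        acc ++ (List.range' k (min c (34 ^ l - k))).map (fun i => f ((pvDigitsB i l).reverse)) := by
  intro c
  induction c with
  | zero => intro k acc hk; simp [pvLoopA]
  | succ c ih =>
    intro k acc hk
    have hstep : pvLoopA prefix_ length (c + 1) (some ((pvDigLE k l).reverse)) acc =
        pvLoopA prefix_ length c (pvIncrBE ((pvDigLE k l).reverse))
          (acc ++ [f ((pvDigitsB k l).reverse)]) := by
      simp [pvLoopA, hf, pvRawOf_dig]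
    rw [hstep, pvIncrBE_dig l k hk]
    by_cases h1 : k + 1 < 34 ^ l
    · rw [if_pos h1, ih (k + 1) _ h1]
      have hmin : min (c + 1) (34 ^ l - k) = (min c (34 ^ l - (k + 1))) + 1 := by omega
      rw [hmin, List.range'_succ]
      simp
    · rw [if_neg h1, pvLoopA_none]
      have hmin : min (c + 1) (34 ^ l - k) = 1 := by omega
      rw [hmin]
      simp [List.range']

theorem pv_main (prefix_ : String) (length : Int) (count : Int) (l : Nat)
    (hl : length.toNat = l) (hc : 0 ≤ count) (f : List Char → String)
    (hfmt : pvFmtB prefix_ length = some f)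
    (hf : ∀ raw ids, pvEmitA prefix_ length raw ids = ids ++ [f raw]) :
    gen_ids_py prefix_ length count = gen_ids_py_alt prefix_ length count := by
  have hpos : 0 < 34 ^ l := Nat.pow_pos (by norm_num)
  have h0 : (List.replicate l 0 : List Nat) = (pvDigLE 0 l).reverse := by
    rw [pvDigLE_zero]; simp
  have hA : gen_ids_py prefix_ length count =
      (List.range' 0 (min count.toNat (34 ^ l))).map (fun i => f ((pvDigitsB i l).reverse)) := by
    rw [gen_ids_py, hl, h0, pvLoopA_emit prefix_ length l f hf count.toNat 0 [] hpos]
    simp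
  have hn : (min count ((34 : Int) ^ l)).toNat = min count.toNat (34 ^ l) := by
    have : ((34 : Int) ^ l) = ((34 ^ l : Nat) : Int) := by push_cast; ring
    omega
  rw [hA, gen_ids_py_alt, hfmt]
  simp only [hl, hn, List.range_eq_range']

-- ===== VERDICT (by name: the statement is the Claim_ definition above) =====
theorem gen_ids_py_spec : Claim_equal_gen_ids_py := by
  intro prefix_ length count _ hpre
  unfold Spec_gen_ids_py
  obtain ⟨hl, hc⟩ := hpre
  by_cases h3 : length = 3
  · subst h3
    exact pv_main prefix_ 3 count 3 rfl hc _ rfl (fun raw ids => by simp [pvEmitA])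
  · by_cases h5 : length = 5
    · subst h5
      exact pv_main prefix_ 5 count 5 rfl hc _ rfl (fun raw ids => by simp [pvEmitA])
    · by_cases h7 : length = 7
      · subst h7
        exact pv_main prefix_ 7 count 7 rfl hc _ rfl (fun raw ids => by simp [pvEmitA])
      · rw [gen_ids_py, pvLoopA_skip prefix_ length h3 h5 h7]
        rw [gen_ids_py_alt]
        have : pvFmtB prefix_ length = none := by simp [pvFmtB, h3, h5, h7]
        rw [this]
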